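-- pv_equiv track=rewrite | github.com/abhilash-dasgate77/CircuitPowerPlay | timing_calculator.py | reg1
-- ===== SOURCE A (Python) =====
-- std_cell_delay = 23 #ps
--
-- def ND(a,b):
-- 	return max(a,b) + std_cell_delay
--
-- def NT(a):
-- 	t1 = ND(a,a)
-- 	return t1
--
-- def reg1(en_t,d,c):#d - data, c - clk, en_t - enable time in clocks
-- 	t1 = ND(d,c)
-- 	t2 = NT(d)
--
-- 	t3 = ND(c,t2)
--
-- 	t4 = ND(t1,0)
-- 	t5 = ND(0,t3)
--
-- 	while(en_t):
-- 		t4 = ND(t1,t5)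
-- 		t5 = ND(t4,t3)
-- 		en_t -= 1
-- 	return (t4,t5)
-- ===== SOURCE B (Python) =====
-- std_cell_delay = 23  # ps
--
-- def reg1(en_t, d, c):
--     # Closed form of A's max-plus recurrence: after the first loop iteration
--     # t5 >= t3 + 23, so each further iteration just adds 46 to t5 (and t4 = t5 - 23).
--     t1 = max(d, c) + std_cell_delay
--     t3 = max(c, d + std_cell_delay) + std_cell_delay
--     if en_t == 0:
--         return (max(t1, 0) + std_cell_delay, max(0, t3) + std_cell_delay)
--     t5_0 = max(0, t3) + std_cell_delay
--     t4_1 = max(t1, t5_0) + std_cell_delay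
--     t5_1 = max(t4_1, t3) + std_cell_delay
--     if en_t == 1:
--         return (t4_1, t5_1)
--     t5 = t5_1 + 2 * std_cell_delay * (en_t - 1)
--     return (t5 - std_cell_delay, t5)
-- ===== Notes on version B (the rewrite author's own statement) =====
-- stated objective: faster
-- what changed: Replaced the en_t-step max-plus iteration by a closed form: after one iteration t5 dominates t3+23, so each further iteration adds exactly 46; B computes the first step and jumps to the answer arithmetically.
import Mathlib
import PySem

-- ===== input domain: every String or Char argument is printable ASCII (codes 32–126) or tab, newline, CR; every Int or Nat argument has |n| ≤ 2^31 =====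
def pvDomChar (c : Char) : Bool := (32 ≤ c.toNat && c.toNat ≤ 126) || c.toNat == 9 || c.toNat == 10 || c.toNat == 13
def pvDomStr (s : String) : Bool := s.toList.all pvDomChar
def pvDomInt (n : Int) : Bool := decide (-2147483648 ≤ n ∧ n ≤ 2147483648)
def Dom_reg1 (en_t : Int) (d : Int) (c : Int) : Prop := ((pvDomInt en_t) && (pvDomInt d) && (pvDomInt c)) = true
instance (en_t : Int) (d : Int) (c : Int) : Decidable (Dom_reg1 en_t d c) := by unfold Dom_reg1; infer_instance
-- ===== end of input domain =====

-- B replaces A's en_t-step loop by a closed form (each iteration past the first adds 46); O(1) vs O(en_t).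

-- ===== PORT A =====
def ND (a b : Int) : Int := max a b + 23

def NT (a : Int) : Int := ND a a

def reg1Loop : Nat → Int → Int → Int → Int → Int × Int
  | 0, _, _, t4, t5 => (t4, t5)
  | n + 1, t1, t3, _, t5 =>
      let t4' := ND t1 t5
      let t5' := ND t4' t3
      reg1Loop n t1 t3 t4' t5'

def reg1 (en_t : Int) (d : Int) (c : Int) : Int × Int :=
  let t1 := ND d c
  let t2 := NT d
  let t3 := ND c t2
  let t4 := ND t1 0
  let t5 := ND 0 t3
  reg1Loop en_t.toNat t1 t3 t4 t5

-- ===== PORT B =====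
def reg1_alt (en_t : Int) (d : Int) (c : Int) : Int × Int :=
  let t1 := max d c + 23
  let t3 := max c (d + 23) + 23
  if en_t = 0 then (max t1 0 + 23, max 0 t3 + 23)
  else
    let t5_0 := max 0 t3 + 23
    let t4_1 := max t1 t5_0 + 23
    let t5_1 := max t4_1 t3 + 23
    if en_t = 1 then (t4_1, t5_1)
    else
      let t5 := t5_1 + 2 * 23 * (en_t - 1)
      (t5 - 23, t5)

-- ===== PRECONDITION & SPEC =====
-- Pre_ excludes en_t < 0, on which A's `while(en_t)` decrements forever and never returns.
def Pre_reg1 (en_t : Int) (_d : Int) (_c : Int) : Prop := 0 ≤ en_t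
instance (en_t : Int) (d : Int) (c : Int) : Decidable (Pre_reg1 en_t d c) := by unfold Pre_reg1; infer_instance
def pvWitness_reg1 : Int × Int × Int := (3, 5, 7)

def Spec_reg1 (en_t : Int) (d : Int) (c : Int) (out : Int × Int) : Prop := out = reg1_alt en_t d c
instance (en_t : Int) (d : Int) (c : Int) (out : Int × Int) : Decidable (Spec_reg1 en_t d c out) := by unfold Spec_reg1; infer_instance

-- ===== CLAIM (what is proved, stated in full; the proofs are below) =====
def Claim_equal_reg1 : Prop := ∀ (en_t : Int) (d : Int) (c : Int), Dom_reg1 en_t d c → Pre_reg1 en_t d c → Spec_reg1 en_t d c (reg1 en_t d c)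

-- ===== LEMMAS AND PROOFS =====

-- After t5 dominates t3 + 23 (with t3 ≥ t1), each loop step sets t4 := t5 + 23, t5 := t5 + 46.
theorem reg1Loop_stable (n : Nat) : ∀ (t1 t3 t4 t5 : Int), t1 ≤ t3 → t3 + 23 ≤ t5 →
    reg1Loop (n + 1) t1 t3 t4 t5 = (t5 + 23 + 46 * n, t5 + 46 + 46 * n) := by
  induction n with
  | zero =>
      intro t1 t3 t4 t5 h1 h2
      simp only [reg1Loop, ND, Prod.mk.injEq, Nat.cast_zero]
      constructor <;> omega
  | succ m ih =>
      intro t1 t3 t4 t5 h1 h2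
      have step : reg1Loop (m + 2) t1 t3 t4 t5 = reg1Loop (m + 1) t1 t3 (t5 + 23) (t5 + 46) := by
        conv_lhs => rw [reg1Loop]
        simp only [ND]
        congr 1 <;> omega
      rw [step, ih _ _ _ _ h1 (by omega)]
      simp only [Prod.mk.injEq]
      push_cast
      constructor <;> ring

theorem reg1_spec : Claim_equal_reg1 := by
  unfold Claim_equal_reg1 Spec_reg1 Pre_reg1
  intro en_t d c _ hpre
  simp only [reg1, reg1_alt, ND, NT, max_self]
  rcases eq_or_lt_of_le hpre with h0 | hpos
  · -- en_t = 0
    subst h0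
    simp [reg1Loop]
  · rcases eq_or_lt_of_le (show (1:Int) ≤ en_t by omega) with h1 | h2
    · -- en_t = 1
      subst h1
      simp [reg1Loop, ND]
    · -- en_t ≥ 2: one explicit loop step, then the stabilized closed form
      have hen1 : ¬ en_t = 0 := by omega
      have hen2 : ¬ en_t = 1 := by omega
      have hnat : en_t.toNat = (en_t - 2).toNat + 1 + 1 := by omega
      rw [hnat]
      simp only [hen1, hen2, if_false]
      conv_lhs => rw [reg1Loop]
      simp only [ND]
      rw [reg1Loop_stable _ _ _ _ _
        (show max d c + 23 ≤ max c (d + 23) + 23 by omega)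
        (show (max c (d + 23) + 23) + 23 ≤
            max (max (max d c + 23) (max 0 (max c (d + 23) + 23) + 23) + 23) (max c (d + 23) + 23) + 23 by omega)]
      have hcast : (((en_t - 2).toNat : Int)) = en_t - 2 := by omega
      simp only [Prod.mk.injEq, hcast]
      constructor <;> omega
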